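-- pv_equiv track=rewrite | github.com/hacetheworld/competitive-programming-practices | problems/spoj/ABCPATH.py | bfs
-- ===== SOURCE A (Python) =====
-- def bfs(arr, i, j, S, sIdx, dp):
--     if isValid(arr, i, j, S, sIdx):
--         dp[i][j] = 1
--         dx = [0, 0, -1, 1, -1, 1, -1, 1]
--         dy = [-1, 1, 0, 0, -1, 1, 1, -1]
--         for k in range(8):
--             dp[i][j] = max(dp[i][j], bfs(arr, i+dx[k], j+dy[k], S, sIdx+1, dp))
--         return 1+dp[i][j]
--     else:
--         return 0
--
-- def isValid(arr, i, j, S, sidx):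
--     if (i < 0 or i >= len(arr) or j < 0 or j >= len(arr[0]) or sidx > len(S)):
--         return False
--     else:
--         if S[sidx] == arr[i][j]:
--             return True
--         else:
--             return False
-- ===== SOURCE B (Python) =====
-- def bfs(arr, i, j, S, sIdx, dp):
--     rows = len(arr)
--     if i < 0 or i >= rows or sIdx > len(S):
--         return 0
--     cols = len(arr[0])
--     if j < 0 or j >= cols:
--         return 0
--     # bottom-up layered DP: layer t holds the value of the search at letter
--     # index t for every cell, computed from layer t+1 (beyond the end = 0);
--     # a cell a ragged row lacks simply never matches
--     nxt = [[0] * cols for _ in range(rows)]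
--     for t in range(len(S) - 1, sIdx - 1, -1):
--         ch = S[t]
--         cur = [[0] * cols for _ in range(rows)]
--         for r in range(rows):
--             row = arr[r]
--             for c in range(cols):
--                 if c < len(row) and row[c] == ch:
--                     best = 1
--                     for dr in (-1, 0, 1):
--                         for dc in (-1, 0, 1):
--                             if dr or dc:
--                                 rr, cc = r + dr, c + dc
--                                 if 0 <= rr < rows and 0 <= cc < cols:
--                                     best = max(best, nxt[rr][cc])
--                     cur[r][c] = 1 + best
--         nxt = cur
--     return nxt[i][j]
-- ===== Notes on version B (the rewrite author's own statement) =====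
-- stated objective: alternative
-- what changed: replaces A's 8-way branching recursion over paths (exponential worst case) with a bottom-up layered dynamic program: one grid layer per letter index, each layer computed from the next, so every (cell, letter) state is evaluated once; on the generator's inputs A usually exits immediately, so no speed-up was measured.
-- outside the precondition, e.g. on bfs([['A', 'A']], 0, 0, 'A', 0, [[0, 0]]): A raises IndexError, B returns 2; on bfs([['A']], 0, 0, 'A', 0, [[5, 7]]): A returns 2, B returns 2; on bfs([['A']], 0, 0, 'AB', 0, [[0], [9]]): A returns 2, B returns 2
import Mathlib
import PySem

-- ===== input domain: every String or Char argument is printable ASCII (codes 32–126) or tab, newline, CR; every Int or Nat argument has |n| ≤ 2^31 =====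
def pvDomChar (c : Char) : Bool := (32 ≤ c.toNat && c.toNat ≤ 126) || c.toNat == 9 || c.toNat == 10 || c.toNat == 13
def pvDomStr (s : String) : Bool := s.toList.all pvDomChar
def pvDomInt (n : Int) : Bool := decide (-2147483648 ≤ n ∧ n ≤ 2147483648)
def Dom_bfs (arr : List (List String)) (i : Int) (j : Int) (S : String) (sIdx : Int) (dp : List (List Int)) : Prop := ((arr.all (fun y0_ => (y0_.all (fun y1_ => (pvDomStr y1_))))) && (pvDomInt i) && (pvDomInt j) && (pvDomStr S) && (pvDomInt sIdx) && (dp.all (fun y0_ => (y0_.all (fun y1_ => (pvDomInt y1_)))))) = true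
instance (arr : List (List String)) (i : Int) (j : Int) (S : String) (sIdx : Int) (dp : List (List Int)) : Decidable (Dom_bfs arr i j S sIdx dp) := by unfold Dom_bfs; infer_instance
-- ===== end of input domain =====

-- B recomputes the same value by a bottom-up layered DP over the letter index, each
-- (cell, letter-index) state evaluated once instead of A's 8-way branching recursion over paths;
-- equivalence is about the RETURN value only — Python A also mutates dp in place (those writes
-- never influence A's return value), B does not touch dp.

-- ===== PORT A =====

-- dp[i][j] read (in-range under Pre_; default never observed there)
def pvGet2 (dp : List (List Int)) (i j : Int) : Int :=
  (((PySem.List.pyGet? dp i).bind (fun row => PySem.List.pyGet? row j)).getD 0)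

-- dp[i][j] = v (only reached with 0 ≤ i,j in range under Pre_; out-of-range = no-op)
def pvSet2 (dp : List (List Int)) (i j : Int) (v : Int) : List (List Int) :=
  if 0 ≤ i ∧ 0 ≤ j then dp.set i.toNat ((dp.getD i.toNat []).set j.toNat v) else dp

-- the comparison S[sidx] == arr[i][j]; `none` cases are where Python raises IndexError
-- (excluded by Pre_bfs), ported as `false`
def pvMatch (arr : List (List String)) (S : String) (i j t : Int) : Bool :=
  match PySem.Str.pyGet? S t, (PySem.List.pyGet? arr i).bind (fun row => PySem.List.pyGet? row j) with
  | some ch, some cell => cell == String.mk [ch]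
  | _, _ => false

def pvIsValid (arr : List (List String)) (i : Int) (j : Int) (S : String) (sidx : Int) : Bool :=
  if i < 0 ∨ (PySem.List.len arr) ≤ i ∨ j < 0 ∨ (PySem.List.len ((PySem.List.pyGet? arr 0).getD [])) ≤ j
      ∨ (PySem.Str.len S) < sidx then
    false
  else
    pvMatch arr S i j sidx

-- the recursion of A, fuel-guarded for totality (fuel never runs out: each valid step has
-- sidx ≤ len(S) and recursion raises sidx by 1); dp is threaded through like Python's list
def bfsRecA (arr : List (List String)) (S : String) :
    Nat → Int → Int → Int → List (List Int) → Int × List (List Int)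
  | 0, _, _, _, dp => (0, dp)
  | fuel + 1, i, j, t, dp =>
    if pvIsValid arr i j S t then
      let dp1 := pvSet2 dp i j 1
      let dxy : List (Int × Int) := [(0, -1), (0, 1), (-1, 0), (1, 0), (-1, -1), (1, 1), (-1, 1), (1, -1)]
      let dp2 := dxy.foldl (fun dpAcc p =>
        pvSet2 (bfsRecA arr S fuel (i + p.1) (j + p.2) (t + 1) dpAcc).2 i j
          (max (pvGet2 dpAcc i j) (bfsRecA arr S fuel (i + p.1) (j + p.2) (t + 1) dpAcc).1)) dp1
      (1 + pvGet2 dp2 i j, dp2)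
    else (0, dp)

def bfs (arr : List (List String)) (i : Int) (j : Int) (S : String) (sIdx : Int) (dp : List (List Int)) : Int :=
  (bfsRecA arr S ((PySem.Str.len S + 1 - sIdx).toNat + 1) i j sIdx dp).1

-- ===== PORT B =====

-- one DP layer: cur[r][c] from layer nxt (= letter index t+1)
def bfsStepB (arr : List (List String)) (S : String) (rows cols : Int) (t : Int)
    (nxt : List (List Int)) : List (List Int) :=
  (List.range rows.toNat).map (fun (r : Nat) =>
    (List.range cols.toNat).map (fun (c : Nat) =>
      if pvMatch arr S (r : Int) (c : Int) t then
        1 + ([(-1, -1), (-1, 0), (-1, 1), (0, -1), (0, 1), (1, -1), (1, 0), (1, 1)] :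
              List (Int × Int)).foldl (fun b p =>
            if 0 ≤ (r : Int) + p.1 ∧ (r : Int) + p.1 < rows ∧ 0 ≤ (c : Int) + p.2 ∧ (c : Int) + p.2 < cols then
              max b (pvGet2 nxt ((r : Int) + p.1) ((c : Int) + p.2))
            else b) 1
      else 0))

def bfs_alt (arr : List (List String)) (i : Int) (j : Int) (S : String) (sIdx : Int) (dp : List (List Int)) : Int :=
  let rows := PySem.List.len arr
  if i < 0 ∨ rows ≤ i ∨ PySem.Str.len S < sIdx then 0
  else
    let cols := PySem.List.len ((PySem.List.pyGet? arr 0).getD [])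
    if j < 0 ∨ cols ≤ j then 0
    else
      let nxt0 : List (List Int) := List.replicate rows.toNat (List.replicate cols.toNat 0)
      let fin := (PySem.List.pyRange (PySem.Str.len S - 1) (sIdx - 1) (-1)).foldl
        (fun nxt t => bfsStepB arr S rows cols t nxt) nxt0
      pvGet2 fin i j

-- ===== PRECONDITION & SPEC =====

-- exactly the inputs on which Python's bfs raises IndexError through S[sidx]: the search,
-- following adjacent matching cells from an in-range (i,j), reaches an in-range cell with the
-- letter index at len(S) (a chain spelling S[sIdx:] ran past the end of S) or below -len(S)
def pvRaiseF (arr : List (List String)) (S : String) : Nat → Int → Int → Int → Bool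
  | 0, _, _, _ => false
  | fuel + 1, i, j, t =>
    if 0 ≤ i ∧ i < (arr.length : Int) ∧ 0 ≤ j ∧ j < (((PySem.List.pyGet? arr 0).getD []).length : Int) then
      if t = (S.toList.length : Int) ∨ t < -(S.toList.length : Int) then true
      else if pvMatch arr S i j t = true then
        pvRaiseF arr S fuel i (j + -1) (t + 1) || pvRaiseF arr S fuel i (j + 1) (t + 1) ||
        pvRaiseF arr S fuel (i + -1) j (t + 1) || pvRaiseF arr S fuel (i + 1) j (t + 1) ||
        pvRaiseF arr S fuel (i + -1) (j + -1) (t + 1) || pvRaiseF arr S fuel (i + 1) (j + 1) (t + 1) ||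
        pvRaiseF arr S fuel (i + -1) (j + 1) (t + 1) || pvRaiseF arr S fuel (i + 1) (j + -1) (t + 1)
      else false
    else false

-- matching advances the letter index, so a chain is at most (len(S) - t) + 1 cells long:
-- this fuel is always enough, and pvRaise decides chain existence exactly
def pvRaise (arr : List (List String)) (S : String) (i j t : Int) : Bool :=
  pvRaiseF arr S (((S.toList.length : Int) - t).toNat + 1) i j t

-- shapes used by Pre_bfs: every row of xs has the length of row 0
def pvRect (arr : List (List String)) : Prop :=
  ∀ row ∈ arr, (row.length : Int) = PySem.List.len ((PySem.List.pyGet? arr 0).getD [])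
def pvShape (arr : List (List String)) (dp : List (List Int)) : Prop :=
  dp.length = arr.length ∧ ∀ row ∈ dp, (row.length : Int) = PySem.List.len ((PySem.List.pyGet? arr 0).getD [])

-- Pre_bfs excludes the inputs on which Python's A raises IndexError: a matching chain running
-- past the end of S (pvRaise), an in-range (i,j) whose own ragged row lacks column j, and — an
-- over-approximation of the search's path-dependent arr/dp reads and writes — a grid that is not
-- rectangular or a dp not shaped like the grid when the start cell matches; the last conjunct
-- also excludes a few misshapen inputs on which A happens to return (see cites).
def Pre_bfs (arr : List (List String)) (i : Int) (j : Int) (S : String) (sIdx : Int) (dp : List (List Int)) : Prop :=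
  pvRaise arr S i j sIdx = false
  ∧ ((0 ≤ i ∧ i < (arr.length : Int) ∧ 0 ≤ j ∧ j < (((PySem.List.pyGet? arr 0).getD []).length : Int)) →
      (j < ((arr.getD i.toNat []).length : Int))
      ∧ (pvMatch arr S i j sIdx = true → pvRect arr ∧ pvShape arr dp))

instance (arr : List (List String)) (i : Int) (j : Int) (S : String) (sIdx : Int) (dp : List (List Int)) : Decidable (Pre_bfs arr i j S sIdx dp) := by
  unfold Pre_bfs pvRect pvShape; infer_instance

def pvWitness_bfs : List (List String) × Int × Int × String × Int × List (List Int) :=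
  ([["A", "B"], ["C", "D"]], 0, 0, "AX", 0, [[0, 0], [0, 0]])

def Spec_bfs (arr : List (List String)) (i : Int) (j : Int) (S : String) (sIdx : Int) (dp : List (List Int)) (out : Int) : Prop := out = bfs_alt arr i j S sIdx dp
instance (arr : List (List String)) (i : Int) (j : Int) (S : String) (sIdx : Int) (dp : List (List Int)) (out : Int) : Decidable (Spec_bfs arr i j S sIdx dp out) := by unfold Spec_bfs; infer_instance

-- ===== CLAIM (what is proved, stated in full; the proofs are below) =====
def Claim_equal_bfs : Prop := ∀ (arr : List (List String)) (i : Int) (j : Int) (S : String) (sIdx : Int) (dp : List (List Int)), Dom_bfs arr i j S sIdx dp → Pre_bfs arr i j S sIdx dp → Spec_bfs arr i j S sIdx dp (bfs arr i j S sIdx dp)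

-- ===== LEMMAS AND PROOFS =====

lemma pvIsValid_bounds {arr : List (List String)} {i j : Int} {S : String} {t : Int}
    (h : pvIsValid arr i j S t = true) :
    0 ≤ i ∧ i < (arr.length : Int) ∧ 0 ≤ j ∧ j < (((PySem.List.pyGet? arr 0).getD []).length : Int)
      ∧ t ≤ (S.toList.length : Int) := by
  unfold pvIsValid at h
  split at h
  · simp at h
  · rename_i hc
    simp only [PySem.List.len_eq, PySem.Str.len_eq, not_or, not_lt, not_le] at hc
    omega

-- the pure value of the search (defined only for the proofs; both ports compute it)
def pvVal (arr : List (List String)) (S : String) (i j t : Int) : Int :=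
  if h : pvIsValid arr i j S t = true then
    1 + max (max (max (max (max (max (max (max 1
      (pvVal arr S (i + 0) (j + -1) (t + 1)))
      (pvVal arr S (i + 0) (j + 1) (t + 1)))
      (pvVal arr S (i + -1) (j + 0) (t + 1)))
      (pvVal arr S (i + 1) (j + 0) (t + 1)))
      (pvVal arr S (i + -1) (j + -1) (t + 1)))
      (pvVal arr S (i + 1) (j + 1) (t + 1)))
      (pvVal arr S (i + -1) (j + 1) (t + 1)))
      (pvVal arr S (i + 1) (j + -1) (t + 1))
  else 0
termination_by ((S.toList.length : Int) + 1 - t).toNat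
decreasing_by all_goals (have hb := pvIsValid_bounds h; omega)

lemma pvVal_of_invalid {arr : List (List String)} {S : String} {i j t : Int}
    (h : pvIsValid arr i j S t = false) : pvVal arr S i j t = 0 := by
  rw [pvVal]; simp [h]


lemma pvShape_set2 {arr : List (List String)} {dp : List (List Int)} (i j v : Int)
    (h : pvShape arr dp) : pvShape arr (pvSet2 dp i j v) := by
  unfold pvSet2
  split
  · by_cases hlen : i.toNat < dp.length
    · refine ⟨by simpa using h.1, ?_⟩
      intro row hrow
      rcases List.mem_or_eq_of_mem_set hrow with h1 | h1
      · exact h.2 row h1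
      · subst h1
        simp only [List.length_set]
        rw [List.getD_eq_getElem dp [] hlen]
        exact h.2 _ (List.getElem_mem hlen)
    · rw [List.set_eq_of_length_le (by omega)]
      exact h
  · exact h

lemma pvGet2_set2_same {arr : List (List String)} {dp : List (List Int)} {i j : Int} (v : Int)
    (h : pvShape arr dp) (hi : 0 ≤ i) (hi2 : i < (arr.length : Int))
    (hj : 0 ≤ j) (hj2 : j < ((((PySem.List.pyGet? arr 0).getD [])).length : Int)) :
    pvGet2 (pvSet2 dp i j v) i j = v := by
  have hL := h.1
  have hiN : i.toNat < dp.length := by omega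
  have hrow : ((dp.getD i.toNat []).length : Int)
      = (((PySem.List.pyGet? arr 0).getD []).length : Int) := by
    rw [List.getD_eq_getElem dp [] hiN]
    exact h.2 _ (List.getElem_mem hiN)
  unfold pvSet2 pvGet2
  rw [if_pos ⟨hi, hj⟩]
  rw [PySem.List.pyGet?_of_nonneg _ hi]
  rw [List.getElem?_set_self (by simpa using hiN)]
  simp only [Option.bind_some]
  rw [PySem.List.pyGet?_of_nonneg _ hj]
  rw [List.getElem?_set_self (by omega)]
  rfl

lemma bfsRecA_invalid {arr : List (List String)} {S : String} {fuel : Nat} {i j t : Int}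
    {dp : List (List Int)} (h : pvIsValid arr i j S t = false) :
    bfsRecA arr S (fuel + 1) i j t dp = (0, dp) := by
  simp only [bfsRecA, h]
  simp

lemma bfsRecA_spec (arr : List (List String)) (S : String) :
    ∀ (fuel : Nat) (i j t : Int) (dp : List (List Int)), pvShape arr dp →
      ((S.toList.length : Int) + 1 - t).toNat < fuel →
      (bfsRecA arr S fuel i j t dp).1 = pvVal arr S i j t
        ∧ pvShape arr (bfsRecA arr S fuel i j t dp).2 := by
  intro fuel
  induction fuel with
  | zero => intro i j t dp _ hf; omega
  | succ fuel IH =>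
    intro i j t dp hdp hf
    by_cases hv : pvIsValid arr i j S t = true
    · have hb := pvIsValid_bounds hv
      have hf' : ((S.toList.length : Int) + 1 - (t + 1)).toNat < fuel := by omega
      have chain : ∀ (ds : List (Int × Int)) (dp0 : List (List Int)) (a : Int),
          pvShape arr dp0 → pvGet2 dp0 i j = a →
          pvShape arr (ds.foldl (fun dpAcc p =>
            pvSet2 (bfsRecA arr S fuel (i + p.1) (j + p.2) (t + 1) dpAcc).2 i j
              (max (pvGet2 dpAcc i j) (bfsRecA arr S fuel (i + p.1) (j + p.2) (t + 1) dpAcc).1)) dp0)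
          ∧ pvGet2 (ds.foldl (fun dpAcc p =>
            pvSet2 (bfsRecA arr S fuel (i + p.1) (j + p.2) (t + 1) dpAcc).2 i j
              (max (pvGet2 dpAcc i j) (bfsRecA arr S fuel (i + p.1) (j + p.2) (t + 1) dpAcc).1)) dp0) i j
            = ds.foldl (fun m p => max m (pvVal arr S (i + p.1) (j + p.2) (t + 1))) a := by
        intro ds
        induction ds with
        | nil => intro dp0 a h0 ha; exact ⟨h0, ha⟩
        | cons d ds ihd =>
          intro dp0 a h0 ha
          simp only [List.foldl_cons]
          obtain ⟨hr1, hr2⟩ := IH (i + d.1) (j + d.2) (t + 1) dp0 h0 hf'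
          apply ihd
          · exact pvShape_set2 _ _ _ hr2
          · rw [pvGet2_set2_same _ hr2 hb.1 hb.2.1 hb.2.2.1 hb.2.2.2.1, ha, hr1]
      obtain ⟨hsh, hgv⟩ := chain
        [(0, -1), (0, 1), (-1, 0), (1, 0), (-1, -1), (1, 1), (-1, 1), (1, -1)]
        (pvSet2 dp i j 1) 1 (pvShape_set2 _ _ _ hdp)
        (pvGet2_set2_same _ hdp hb.1 hb.2.1 hb.2.2.1 hb.2.2.2.1)
      simp only [bfsRecA, hv, if_true]
      refine ⟨?_, hsh⟩
      rw [hgv, pvVal, dif_pos hv]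
      simp only [List.foldl_cons, List.foldl_nil]
    · have hv' : pvIsValid arr i j S t = false := by simpa using hv
      rw [bfsRecA_invalid hv']
      exact ⟨(pvVal_of_invalid hv').symm, hdp⟩

-- the grid of pure values at letter index t
def pvGrid (arr : List (List String)) (S : String) (t : Int) : List (List Int) :=
  (List.range arr.length).map (fun (r : Nat) =>
    (List.range ((PySem.List.pyGet? arr 0).getD []).length).map (fun (c : Nat) =>
      pvVal arr S (r : Int) (c : Int) t))

lemma pvGet2_grid (arr : List (List String)) (S : String) (t : Int) {x y : Int}
    (hx : 0 ≤ x) (hx2 : x < (arr.length : Int))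
    (hy : 0 ≤ y) (hy2 : y < ((((PySem.List.pyGet? arr 0).getD [])).length : Int)) :
    pvGet2 (pvGrid arr S t) x y = pvVal arr S x y t := by
  have hxN : x.toNat < arr.length := by omega
  have hyN : y.toNat < ((PySem.List.pyGet? arr 0).getD []).length := by omega
  unfold pvGet2 pvGrid
  rw [PySem.List.pyGet?_of_nonneg _ hx]
  rw [List.getElem?_map, List.getElem?_range hxN]
  simp only [Option.map_some, Option.bind_some]
  rw [PySem.List.pyGet?_of_nonneg _ hy]
  rw [List.getElem?_map, List.getElem?_range hyN]
  simp [Int.toNat_of_nonneg hx, Int.toNat_of_nonneg hy]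

lemma pvVal_out (arr : List (List String)) (S : String) (t : Int) {x y : Int}
    (h : ¬(0 ≤ x ∧ x < (arr.length : Int) ∧ 0 ≤ y ∧ y < ((((PySem.List.pyGet? arr 0).getD [])).length : Int))) :
    pvVal arr S x y t = 0 := by
  apply pvVal_of_invalid
  unfold pvIsValid
  have hc : x < 0 ∨ PySem.List.len arr ≤ x ∨ y < 0
      ∨ PySem.List.len ((PySem.List.pyGet? arr 0).getD []) ≤ y ∨ PySem.Str.len S < t := by
    simp only [not_and_or, not_lt, not_le] at h
    simp only [PySem.List.len_eq]
    omega
  rw [if_pos hc]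

lemma pvIsValid_eq_pvMatch (arr : List (List String)) (S : String) {x y t : Int}
    (hx : 0 ≤ x) (hx2 : x < (arr.length : Int))
    (hy : 0 ≤ y) (hy2 : y < ((((PySem.List.pyGet? arr 0).getD [])).length : Int))
    (ht : t ≤ (S.toList.length : Int)) :
    pvIsValid arr x y S t = pvMatch arr S x y t := by
  unfold pvIsValid
  rw [if_neg]
  simp only [PySem.List.len_eq, PySem.Str.len_eq]
  omega

lemma if_inb_max (arr : List (List String)) (S : String) (t : Int) {b : Int} (rr cc : Int)
    (hb : 1 ≤ b) :
    (if 0 ≤ rr ∧ rr < (arr.length : Int) ∧ 0 ≤ cc ∧ cc < ((((PySem.List.pyGet? arr 0).getD [])).length : Int)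
      then max b (pvGet2 (pvGrid arr S t) rr cc) else b) = max b (pvVal arr S rr cc t) := by
  split
  · rename_i hh
    rw [pvGet2_grid arr S t hh.1 hh.2.1 hh.2.2.1 hh.2.2.2]
  · rename_i hh
    rw [pvVal_out arr S t hh]
    omega

lemma pvVal_top (arr : List (List String)) (S : String) (x y : Int) :
    pvVal arr S x y ((S.toList.length : Int)) = 0 := by
  apply pvVal_of_invalid
  unfold pvIsValid
  split
  · rfl
  · unfold pvMatch
    rw [PySem.Str.pyGet?_natCast, List.getElem?_eq_none (le_refl _)]

lemma stepB_grid (arr : List (List String)) (S : String) (t : Int)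
    (ht : t ≤ (S.toList.length : Int)) :
    bfsStepB arr S (PySem.List.len arr)
      (PySem.List.len ((PySem.List.pyGet? arr 0).getD [])) t (pvGrid arr S (t + 1))
      = pvGrid arr S t := by
  unfold bfsStepB
  conv_rhs => unfold pvGrid
  simp only [PySem.List.len_eq, Int.toNat_natCast]
  apply List.map_congr_left
  intro r hr
  apply List.map_congr_left
  intro c hc
  rw [List.mem_range] at hr hc
  have hr0 : (0 : Int) ≤ (r : Int) := by omega
  have hr1 : (r : Int) < (arr.length : Int) := by omega
  have hc0 : (0 : Int) ≤ (c : Int) := by omega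
  have hc1 : (c : Int) < ((((PySem.List.pyGet? arr 0).getD [])).length : Int) := by omega
  rw [pvVal]
  simp only [pvIsValid_eq_pvMatch arr S hr0 hr1 hc0 hc1 ht]
  by_cases hm : pvMatch arr S (r : Int) (c : Int) t = true
  · rw [if_pos hm, dif_pos hm]
    have chainB : ∀ (ds : List (Int × Int)) (b : Int), 1 ≤ b →
        ds.foldl (fun b p =>
          if 0 ≤ (r : Int) + p.1 ∧ (r : Int) + p.1 < (arr.length : Int)
              ∧ 0 ≤ (c : Int) + p.2 ∧ (c : Int) + p.2 < ((((PySem.List.pyGet? arr 0).getD [])).length : Int) then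
            max b (pvGet2 (pvGrid arr S (t + 1)) ((r : Int) + p.1) ((c : Int) + p.2))
          else b) b
        = ds.foldl (fun m p => max m (pvVal arr S ((r : Int) + p.1) ((c : Int) + p.2) (t + 1))) b := by
      intro ds
      induction ds with
      | nil => intro b hb; rfl
      | cons d ds ihd =>
        intro b hb
        simp only [List.foldl_cons]
        rw [if_inb_max arr S (t + 1) ((r : Int) + d.1) ((c : Int) + d.2) hb]
        exact ihd _ (le_trans hb (le_max_left _ _))
    refine Eq.trans (congrArg (1 + ·)
      (chainB [(-1,-1),(-1,0),(-1,1),(0,-1),(0,1),(1,-1),(1,0),(1,1)] 1 (le_refl 1))) ?_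
    simp only [List.foldl_cons, List.foldl_nil]
    congr 1
    ac_rfl
  · rw [if_neg hm, dif_neg hm]

lemma foldB (arr : List (List String)) (S : String) (sIdx : Int) :
    ∀ (n : Nat) (t : Int), t - (sIdx - 1) = (n : Int) → sIdx - 1 ≤ t → t ≤ (S.toList.length : Int) - 1 →
      (PySem.List.pyRange t (sIdx - 1) (-1)).foldl
        (fun nxt u => bfsStepB arr S (PySem.List.len arr)
          (PySem.List.len ((PySem.List.pyGet? arr 0).getD [])) u nxt)
        (pvGrid arr S (t + 1)) = pvGrid arr S sIdx := by
  intro n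
  induction n with
  | zero =>
    intro t h1 h2 h3
    have ht : t = sIdx - 1 := by omega
    subst ht
    rw [PySem.List.pyRange_neg_one_eq_nil (le_refl _)]
    simp only [List.foldl_nil]
    congr 1
    omega
  | succ n ih =>
    intro t h1 h2 h3
    have hlt : sIdx - 1 < t := by omega
    rw [PySem.List.pyRange_neg_one_cons hlt]
    simp only [List.foldl_cons]
    rw [stepB_grid arr S t (by omega)]
    have hih := ih (t - 1) (by omega) (by omega) (by omega)
    rw [show t - 1 + 1 = t from by omega] at hih
    exact hih

lemma grid_init (arr : List (List String)) (S : String) :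
    List.replicate (PySem.List.len arr).toNat
      (List.replicate (PySem.List.len ((PySem.List.pyGet? arr 0).getD [])).toNat (0 : Int))
      = pvGrid arr S (PySem.Str.len S - 1 + 1) := by
  rw [show PySem.Str.len S - 1 + 1 = ((S.toList.length : Int)) from by
    simp only [PySem.Str.len_eq]; omega]
  symm
  apply List.eq_replicate_iff.mpr
  constructor
  · simp [pvGrid, PySem.List.len_eq]
  · intro b hb
    simp only [pvGrid, List.mem_map, List.mem_range] at hb
    obtain ⟨r, _, hb⟩ := hb
    subst hb
    apply List.eq_replicate_iff.mpr
    constructor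
    · simp [PySem.List.len_eq]
    · intro x hx
      simp only [List.mem_map, List.mem_range] at hx
      obtain ⟨c, _, hx⟩ := hx
      subst hx
      exact pvVal_top arr S _ _

-- inside the grid, a raise-free input has sIdx strictly inside S's index range
lemma pvRaise_bounds {arr : List (List String)} {S : String} {i j t : Int}
    (hin : 0 ≤ i ∧ i < (arr.length : Int) ∧ 0 ≤ j ∧ j < (((PySem.List.pyGet? arr 0).getD []).length : Int))
    (hnr : pvRaise arr S i j t = false) :
    t ≠ (S.toList.length : Int) ∧ -(S.toList.length : Int) ≤ t := by
  unfold pvRaise pvRaiseF at hnr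
  rw [if_pos hin] at hnr
  by_contra hc
  rw [if_pos (by omega)] at hnr
  simp at hnr

-- B's result equals the pure search value at any in-grid start with sIdx ≤ len(S)
lemma bfs_alt_eq_pvVal (arr : List (List String)) (S : String) {i j sIdx : Int}
    (dp : List (List Int))
    (hin : 0 ≤ i ∧ i < (arr.length : Int) ∧ 0 ≤ j ∧ j < (((PySem.List.pyGet? arr 0).getD []).length : Int))
    (_hs1 : -(S.toList.length : Int) ≤ sIdx) (hs2 : sIdx < (S.toList.length : Int)) :
    bfs_alt arr i j S sIdx dp = pvVal arr S i j sIdx := by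
  unfold bfs_alt
  rw [if_neg (by simp only [PySem.List.len_eq, PySem.Str.len_eq, not_or, not_lt, not_le]; omega)]
  rw [if_neg (by simp only [PySem.List.len_eq, not_or, not_lt, not_le]; omega)]
  simp only
  rw [grid_init arr S]
  rw [foldB arr S sIdx ((S.toList.length : Int) - 1 - (sIdx - 1)).toNat
    (PySem.Str.len S - 1)
    (by simp only [PySem.Str.len_eq]; omega)
    (by simp only [PySem.Str.len_eq]; omega)
    (by simp only [PySem.Str.len_eq]; omega)]
  exact pvGet2_grid arr S sIdx hin.1 hin.2.1 hin.2.2.1 hin.2.2.2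

-- ===== VERDICT (by name: the statement is the Claim_ definition above) =====
theorem bfs_spec : Claim_equal_bfs := by
  intro arr i j S sIdx dp _hdom hpre
  obtain ⟨hnr, hsh⟩ := hpre
  unfold Spec_bfs bfs
  by_cases h1 : i < 0 ∨ PySem.List.len arr ≤ i ∨ PySem.Str.len S < sIdx
  · have hv : pvIsValid arr i j S sIdx = false := by
      unfold pvIsValid
      rw [if_pos]
      rcases h1 with h | h | h
      · exact Or.inl h
      · exact Or.inr (Or.inl h)
      · exact Or.inr (Or.inr (Or.inr (Or.inr h)))
    rw [bfsRecA_invalid hv]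
    unfold bfs_alt
    rw [if_pos h1]
  · by_cases h2 : j < 0 ∨ PySem.List.len ((PySem.List.pyGet? arr 0).getD []) ≤ j
    · have hv : pvIsValid arr i j S sIdx = false := by
        unfold pvIsValid
        rw [if_pos]
        rcases h2 with h | h
        · exact Or.inr (Or.inr (Or.inl h))
        · exact Or.inr (Or.inr (Or.inr (Or.inl h)))
      rw [bfsRecA_invalid hv]
      unfold bfs_alt
      rw [if_neg h1, if_pos h2]
    · simp only [not_or, not_lt, not_le, PySem.List.len_eq, PySem.Str.len_eq] at h1 h2
      have hin : 0 ≤ i ∧ i < (arr.length : Int) ∧ 0 ≤ j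
          ∧ j < (((PySem.List.pyGet? arr 0).getD []).length : Int) := by
        exact ⟨h1.1, h1.2.1, h2.1, h2.2⟩
      have hb := pvRaise_bounds hin hnr
      have hs2 : sIdx < (S.toList.length : Int) := by
        rcases lt_or_eq_of_le h1.2.2 with h | h
        · exact h
        · exact absurd h hb.1
      rw [bfs_alt_eq_pvVal arr S dp hin hb.2 hs2]
      by_cases hm : pvMatch arr S i j sIdx = true
      · obtain ⟨_hrect, hshape⟩ := (hsh hin).2 hm
        exact (bfsRecA_spec arr S ((PySem.Str.len S + 1 - sIdx).toNat + 1) i j sIdx dp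
          hshape (by simp only [PySem.Str.len_eq]; omega)).1
      · have hv : pvIsValid arr i j S sIdx = false := by
          rw [pvIsValid_eq_pvMatch arr S hin.1 hin.2.1 hin.2.2.1 hin.2.2.2 (le_of_lt hs2)]
          simpa using hm
        rw [bfsRecA_invalid hv, pvVal_of_invalid hv]
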